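-- pv_equiv track=rewrite | github.com/Klaudia1303/student_code_analysis | Progetto-tirocinio2024/data/student_data/2069767_Ficuciello/LabPython08/A_Ex3.py | A_Ex3
-- ===== SOURCE A (Python) =====
-- def A_Ex3(l):
--     l2=[]
--     if l!=[]:
--         for e1 in range(len(l)):
--             for e2 in range(len(l)):
--                 x1=l[e1]
--                 x2=l[e2]
--                 if (len(x1)==len(x2)) and (x1!=x2):
--                     l2.append((x1,x2))
--     return(set(l2))
-- ===== SOURCE B (Python) =====
-- def A_Ex3(l):
--     # B: index the distinct values by length ONCE (dict length -> group), then
--     # pair each distinct value only with the values of its own group; the inner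
--     # scan over values of other lengths disappears and each qualifying pair is
--     # produced exactly once.
--     d = list(dict.fromkeys(l))
--     groups = {}
--     for v in d:
--         groups.setdefault(len(v), []).append(v)
--     out = []
--     for u in d:
--         for v in groups[len(u)]:
--             if v != u:
--                 out.append((u, v))
--     return set(out)
-- ===== Notes on version B (the rewrite author's own statement) =====
-- stated objective: faster
-- what changed: B builds a length->distinct-values index (dict) in one pass over the deduplicated input and pairs each distinct value only with the other values in its own length group, instead of A's scan over all n^2 index pairs with a length test inside and a final set() dedup.
import Mathlib
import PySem

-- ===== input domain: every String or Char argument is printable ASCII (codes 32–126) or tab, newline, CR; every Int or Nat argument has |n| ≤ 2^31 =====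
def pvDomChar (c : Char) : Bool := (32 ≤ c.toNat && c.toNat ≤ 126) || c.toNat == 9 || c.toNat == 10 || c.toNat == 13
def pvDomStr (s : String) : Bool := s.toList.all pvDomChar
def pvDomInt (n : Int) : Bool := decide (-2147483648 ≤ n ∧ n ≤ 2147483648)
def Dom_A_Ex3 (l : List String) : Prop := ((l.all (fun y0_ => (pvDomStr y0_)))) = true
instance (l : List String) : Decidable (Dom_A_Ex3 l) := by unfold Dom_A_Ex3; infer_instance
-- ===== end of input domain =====

-- B indexes the distinct values by length in a dict built once and pairs each distinct value
-- only with the other values of its own length group, instead of A's scan over all n^2 index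
-- pairs with a length test inside and a final set() dedup.

-- ===== PORT A =====
def A_Ex3 (l : List String) : List (String × String) :=
  let l2 : List (String × String) :=
    if l ≠ [] then
      (PySem.List.pyRange 0 (l.length : Int) 1).foldl (fun acc e1 =>
        (PySem.List.pyRange 0 (l.length : Int) 1).foldl (fun acc e2 =>
          let x1 := PySem.List.pyGetD l e1 ""
          let x2 := PySem.List.pyGetD l e2 ""
          if PySem.Str.len x1 = PySem.Str.len x2 ∧ x1 ≠ x2 then acc ++ [(x1, x2)] else acc)
          acc)
        []
    else []
  PySem.Set.ofList l2

-- ===== PORT B =====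
def A_Ex3_alt (l : List String) : List (String × String) :=
  let d := PySem.List.dedup l
  let groups : PySem.Dict Int (List String) :=
    d.foldl (fun g v => g.modify (PySem.Str.len v) [] (fun xs => xs ++ [v]))
      PySem.Dict.empty
  let out := d.foldl (fun acc u =>
    (groups.getD (PySem.Str.len u) []).foldl (fun acc v =>
      if v ≠ u then acc ++ [(u, v)] else acc) acc) []
  PySem.Set.ofList out

-- ===== PRECONDITION & SPEC =====
def Spec_A_Ex3 (l : List String) (out : List (String × String)) : Prop := out = A_Ex3_alt l
instance (l : List String) (out : List (String × String)) : Decidable (Spec_A_Ex3 l out) := by unfold Spec_A_Ex3; infer_instance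

-- ===== CLAIM (what is proved, stated in full; the proofs are below) =====
def Claim_equal_A_Ex3 : Prop := ∀ (l : List String), Dom_A_Ex3 l → Spec_A_Ex3 l (A_Ex3 l)

-- ===== LEMMAS AND PROOFS =====

-- the pair test, and the flatMap normal form both programs reduce to
abbrev pvP (u v : String) : Prop := PySem.Str.len u = PySem.Str.len v ∧ u ≠ v

def pvPairs (xs : List String) : List (String × String) :=
  xs.flatMap (fun u => (xs.filter (fun v => decide (pvP u v))).map (fun v => (u, v)))

-- Set.ofList commutes with filter
theorem pvOfList_filter {α : Type} [BEq α] [LawfulBEq α] (q : α → Bool) (xs : List α) :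
    PySem.Set.ofList (xs.filter q) = (PySem.Set.ofList xs).filter q := by
  induction xs using List.reverseRecOn with
  | nil => simp
  | append_singleton xs x ih =>
    rw [List.filter_append, PySem.Set.ofList_append_singleton]
    by_cases hq : q x = true
    · rw [show List.filter q [x] = [x] by simp [hq], PySem.Set.ofList_append_singleton, ih]
      by_cases hx : x ∈ PySem.Set.ofList xs
      · rw [PySem.Set.add_of_mem hx, PySem.Set.add_of_mem (List.mem_filter.mpr ⟨hx, hq⟩)]
      · rw [PySem.Set.add_of_not_mem hx,
            PySem.Set.add_of_not_mem (fun h => hx (List.mem_filter.mp h).1),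
            List.filter_append]
        simp [hq]
    · rw [show List.filter q [x] = [] by simp [hq], List.append_nil, ih]
      by_cases hx : x ∈ PySem.Set.ofList xs
      · rw [PySem.Set.add_of_mem hx]
      · rw [PySem.Set.add_of_not_mem hx, List.filter_append]
        simp [hq]

-- Set.ofList commutes with an injective map
theorem pvOfList_map_inj {α β : Type} [BEq α] [LawfulBEq α] [BEq β] [LawfulBEq β]
    (f : α → β) (hf : Function.Injective f) (xs : List α) :
    PySem.Set.ofList (xs.map f) = (PySem.Set.ofList xs).map f := by
  induction xs using List.reverseRecOn with
  | nil => simp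
  | append_singleton xs x ih =>
    rw [List.map_append, List.map_singleton, PySem.Set.ofList_append_singleton,
        PySem.Set.ofList_append_singleton, ih]
    by_cases hx : x ∈ PySem.Set.ofList xs
    · rw [PySem.Set.add_of_mem hx, PySem.Set.add_of_mem (List.mem_map_of_mem hx)]
    · rw [PySem.Set.add_of_not_mem hx, PySem.Set.add_of_not_mem (by
        intro hmem
        obtain ⟨y, hy, hyx⟩ := List.mem_map.mp hmem
        exact hx (hf hyx ▸ hy)), List.map_append, List.map_singleton]

-- update with a list all of whose elements are already present is a no-op
theorem pvUpdate_of_subset {α : Type} [BEq α] [LawfulBEq α] (s : PySem.Set α) (bs : List α)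
    (h : ∀ b ∈ bs, b ∈ s) : PySem.Set.update s bs = s := by
  induction bs generalizing s with
  | nil => rfl
  | cons b bs ih =>
    rw [PySem.Set.update_cons, PySem.Set.add_of_mem (h b (by simp))]
    exact ih s (fun x hx => h x (by simp [hx]))

-- update is determined by the dedup of its second argument
theorem pvUpdate_congr {α : Type} [BEq α] [LawfulBEq α] (s : PySem.Set α) (as bs : List α)
    (h : PySem.Set.ofList as = PySem.Set.ofList bs) :
    PySem.Set.update s as = PySem.Set.update s bs := by
  rw [PySem.Set.update_eq_append_filter, PySem.Set.update_eq_append_filter, h]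

-- per-block congruence: blocks with the same dedup give the same update through flatMap
theorem pvUpdate_flatMap_congr {α β : Type} [BEq β] [LawfulBEq β]
    (g h : α → List β) (hg : ∀ u, PySem.Set.ofList (g u) = PySem.Set.ofList (h u))
    (l : List α) (s : PySem.Set β) :
    PySem.Set.update s (l.flatMap g) = PySem.Set.update s (l.flatMap h) := by
  induction l generalizing s with
  | nil => rfl
  | cons x xs ih =>
    rw [List.flatMap_cons, List.flatMap_cons, PySem.Set.update_append, PySem.Set.update_append,
        pvUpdate_congr s (g x) (h x) (hg x), ih]

-- deduplicating the outer list does not change the update through flatMap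
theorem pvUpdate_flatMap_dedup {α β : Type} [BEq α] [LawfulBEq α] [BEq β] [LawfulBEq β]
    (h : α → List β) (l : List α) (s : PySem.Set β) :
    PySem.Set.update s (l.flatMap h) = PySem.Set.update s ((PySem.List.dedup l).flatMap h) := by
  induction l using List.reverseRecOn generalizing s with
  | nil => rfl
  | append_singleton xs x ih =>
    rw [List.flatMap_append, List.flatMap_singleton, PySem.Set.update_append, ih,
        PySem.List.dedup_eq_ofList xs, PySem.List.dedup_eq_ofList (xs ++ [x]),
        PySem.Set.ofList_append_singleton]
    by_cases hx : x ∈ PySem.Set.ofList xs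
    · rw [PySem.Set.add_of_mem hx]
      apply pvUpdate_of_subset
      intro b hb
      rw [PySem.Set.mem_update]
      exact Or.inr (List.mem_flatMap.mpr ⟨x, hx, hb⟩)
    · rw [PySem.Set.add_of_not_mem hx, List.flatMap_append, List.flatMap_singleton,
          PySem.Set.update_append]

-- A's element-level loop nest in flatMap normal form
theorem pvNest_eq_pairs (xs : List String) :
    xs.foldl (fun acc u =>
      xs.foldl (fun acc v =>
        if PySem.Str.len u = PySem.Str.len v ∧ u ≠ v then acc ++ [(u, v)] else acc)
        acc)
      [] = pvPairs xs := by
  have hinner : ∀ (u : String) (acc : List (String × String)),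
      xs.foldl (fun acc v =>
        if PySem.Str.len u = PySem.Str.len v ∧ u ≠ v then acc ++ [(u, v)] else acc) acc
      = acc ++ (xs.filter (fun v => decide (pvP u v))).map (fun v => (u, v)) := by
    intro u acc
    exact PySem.List.foldl_append_ite (fun v => pvP u v) (fun v => (u, v)) xs acc
  calc xs.foldl (fun acc u =>
        xs.foldl (fun acc v =>
          if PySem.Str.len u = PySem.Str.len v ∧ u ≠ v then acc ++ [(u, v)] else acc) acc) []
      = xs.foldl (fun acc u =>
          acc ++ (xs.filter (fun v => decide (pvP u v))).map (fun v => (u, v))) [] := by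
        apply PySem.List.foldl_congr_mem
        intro acc u _
        exact hinner u acc
    _ = pvPairs xs := by
        rw [PySem.List.foldl_append_eq_flatMap]
        rfl

-- A's loop over indices is the loop over elements
theorem pvA_eq_pairs (l : List String) : A_Ex3 l = PySem.Set.ofList (pvPairs l) := by
  unfold A_Ex3
  by_cases hl : l = []
  · subst hl; rfl
  · simp only [hl, ne_eq, not_false_iff, if_true]
    congr 1
    have hinner : ∀ (e1 : Int) (acc : List (String × String)),
        (PySem.List.pyRange 0 (l.length : Int) 1).foldl (fun acc e2 =>
          let x1 := PySem.List.pyGetD l e1 ""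
          let x2 := PySem.List.pyGetD l e2 ""
          if PySem.Str.len x1 = PySem.Str.len x2 ∧ x1 ≠ x2 then acc ++ [(x1, x2)] else acc) acc
        = l.foldl (fun acc x2 =>
            if PySem.Str.len (PySem.List.pyGetD l e1 "") = PySem.Str.len x2 ∧
               PySem.List.pyGetD l e1 "" ≠ x2
            then acc ++ [(PySem.List.pyGetD l e1 "", x2)] else acc) acc := by
      intro e1 acc
      exact PySem.List.foldl_pyRange_zero_pyGetD l ""
        (fun acc x2 =>
          if PySem.Str.len (PySem.List.pyGetD l e1 "") = PySem.Str.len x2 ∧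
             PySem.List.pyGetD l e1 "" ≠ x2
          then acc ++ [(PySem.List.pyGetD l e1 "", x2)] else acc) acc
    calc (PySem.List.pyRange 0 (l.length : Int) 1).foldl (fun acc e1 =>
          (PySem.List.pyRange 0 (l.length : Int) 1).foldl (fun acc e2 =>
            let x1 := PySem.List.pyGetD l e1 ""
            let x2 := PySem.List.pyGetD l e2 ""
            if PySem.Str.len x1 = PySem.Str.len x2 ∧ x1 ≠ x2 then acc ++ [(x1, x2)] else acc)
            acc) []
        = (PySem.List.pyRange 0 (l.length : Int) 1).foldl (fun acc e1 =>
            l.foldl (fun acc x2 =>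
              if PySem.Str.len (PySem.List.pyGetD l e1 "") = PySem.Str.len x2 ∧
                 PySem.List.pyGetD l e1 "" ≠ x2
              then acc ++ [(PySem.List.pyGetD l e1 "", x2)] else acc) acc) [] := by
          apply PySem.List.foldl_congr_mem
          intro acc e1 _
          exact hinner e1 acc
      _ = l.foldl (fun acc x1 =>
            l.foldl (fun acc x2 =>
              if PySem.Str.len x1 = PySem.Str.len x2 ∧ x1 ≠ x2
              then acc ++ [(x1, x2)] else acc) acc) [] := by
          exact PySem.List.foldl_pyRange_zero_pyGetD l ""
            (fun acc x1 =>
              l.foldl (fun acc x2 =>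
                if PySem.Str.len x1 = PySem.Str.len x2 ∧ x1 ≠ x2
                then acc ++ [(x1, x2)] else acc) acc) []
      _ = pvPairs l := pvNest_eq_pairs l

-- B's length index holds exactly the same-length values of its base list, in order
theorem pvGroups_getD (d : List String) (k : Int) :
    (d.foldl (fun g v => g.modify (PySem.Str.len v) [] (fun xs => xs ++ [v]))
        (PySem.Dict.empty : PySem.Dict Int (List String))).getD k []
    = d.filter (fun v => PySem.Str.len v == k) := by
  have hmap : d.foldl (fun g v => g.modify (PySem.Str.len v) [] (fun xs => xs ++ [v]))
        (PySem.Dict.empty : PySem.Dict Int (List String))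
      = (d.map (fun v => (PySem.Str.len v, v))).foldl
          (fun g p => g.modify p.1 [] (fun xs => xs ++ [p.2])) PySem.Dict.empty := by
    rw [List.foldl_map]
  rw [hmap, PySem.Dict.getD_foldl_modify_append, PySem.Dict.getD_empty, List.nil_append,
      List.filter_map, List.map_map]
  simp [Function.comp_def]

-- the group's same-length filter followed by the ≠ test is exactly the pvP filter
theorem pvFilter_group (d : List String) (u : String) :
    ((d.filter (fun v => PySem.Str.len v == PySem.Str.len u)).filter
        (fun v => decide (v ≠ u)))
    = d.filter (fun v => decide (pvP u v)) := by
  rw [List.filter_filter]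
  apply List.filter_congr
  intro v _
  rw [Bool.eq_iff_iff]
  simp only [pvP, Bool.and_eq_true, beq_iff_eq, decide_eq_true_eq, ne_eq, PySem.Str.len_eq,
    Int.natCast_inj]
  constructor
  · rintro ⟨h1, h2⟩
    exact ⟨by omega, fun h => h1 h.symm⟩
  · rintro ⟨h1, h2⟩
    exact ⟨fun h => h2 h.symm, by omega⟩

-- B's loop over the length groups, in flatMap normal form
theorem pvBout_eq (l : List String) :
    (PySem.List.dedup l).foldl (fun acc u =>
      (((PySem.List.dedup l).foldl
          (fun g v => g.modify (PySem.Str.len v) [] (fun xs => xs ++ [v]))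
          (PySem.Dict.empty : PySem.Dict Int (List String))).getD
            (PySem.Str.len u) []).foldl
        (fun acc v => if v ≠ u then acc ++ [(u, v)] else acc) acc) []
    = pvPairs (PySem.List.dedup l) := by
  have hinner : ∀ (u : String) (acc : List (String × String)),
      (((PySem.List.dedup l).foldl
          (fun g v => g.modify (PySem.Str.len v) [] (fun xs => xs ++ [v]))
          (PySem.Dict.empty : PySem.Dict Int (List String))).getD
            (PySem.Str.len u) []).foldl
        (fun acc v => if v ≠ u then acc ++ [(u, v)] else acc) acc
      = acc ++ ((PySem.List.dedup l).filter (fun v => decide (pvP u v))).map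
          (fun v => (u, v)) := by
    intro u acc
    rw [pvGroups_getD (PySem.List.dedup l) (PySem.Str.len u),
        PySem.List.foldl_append_ite (fun v => v ≠ u) (fun v => (u, v)) _ acc,
        pvFilter_group (PySem.List.dedup l) u]
  calc (PySem.List.dedup l).foldl (fun acc u =>
        (((PySem.List.dedup l).foldl
            (fun g v => g.modify (PySem.Str.len v) [] (fun xs => xs ++ [v]))
            (PySem.Dict.empty : PySem.Dict Int (List String))).getD
              (PySem.Str.len u) []).foldl
          (fun acc v => if v ≠ u then acc ++ [(u, v)] else acc) acc) []
      = (PySem.List.dedup l).foldl (fun acc u =>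
          acc ++ ((PySem.List.dedup l).filter (fun v => decide (pvP u v))).map
            (fun v => (u, v))) [] := by
        apply PySem.List.foldl_congr_mem
        intro acc u _
        exact hinner u acc
    _ = pvPairs (PySem.List.dedup l) := by
        rw [PySem.List.foldl_append_eq_flatMap]
        rfl

-- B is the set of pvPairs of the dedup (A_Ex3_alt l unfolds to the left-hand side by zeta)
theorem pvB_eq_pairs (l : List String) :
    A_Ex3_alt l = PySem.Set.ofList (pvPairs (PySem.List.dedup l)) :=
  congrArg PySem.Set.ofList (pvBout_eq l)

-- per-u inner blocks of pvPairs over l and over dedup l have the same dedup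
theorem pvInner_ofList (l : List String) (u : String) :
    PySem.Set.ofList ((l.filter (fun v => decide (pvP u v))).map (fun v => (u, v)))
    = PySem.Set.ofList
        (((PySem.List.dedup l).filter (fun v => decide (pvP u v))).map (fun v => (u, v))) := by
  have hinj : Function.Injective (fun v : String => (u, v)) := by
    intro a b hab; simpa using hab
  rw [pvOfList_map_inj _ hinj, pvOfList_map_inj _ hinj, pvOfList_filter, pvOfList_filter,
      PySem.List.dedup_eq_ofList, PySem.Set.ofList_ofList]

-- ===== VERDICT (by name: the statement is the Claim_ definition above) =====
theorem A_Ex3_spec : Claim_equal_A_Ex3 := by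
  intro l _
  unfold Spec_A_Ex3
  rw [pvA_eq_pairs, pvB_eq_pairs]
  rw [← PySem.Set.update_nil_left, ← PySem.Set.update_nil_left]
  unfold pvPairs
  rw [pvUpdate_flatMap_congr
        (fun u => (l.filter (fun v => decide (pvP u v))).map (fun v => (u, v)))
        (fun u => ((PySem.List.dedup l).filter (fun v => decide (pvP u v))).map (fun v => (u, v)))
        (fun u => pvInner_ofList l u) l []]
  exact pvUpdate_flatMap_dedup _ l []
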